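-- pv_equiv track=rewrite | github.com/inaf-oact-ai/maasai | maasai/nodes.py | _strip_rewrite_metadata_sections
-- ===== SOURCE A (Python) =====
-- def _strip_rewrite_metadata_sections(text: str) -> str:
-- 	"""Remove duplicated metadata sections from rewritten_prompt."""
-- 	if not text:
-- 		return text
--
-- 	markers = [
-- 		"\n**Assumptions**:",
-- 		"\nAssumptions:",
-- 		"\n**Open Questions**:",
-- 		"\nOpen Questions:",
-- 		"\n**Rationale**:",
-- 		"\nRationale:",
-- 	]
--
-- 	cut_positions = [
-- 		text.find(marker)
-- 		for marker in markers
-- 		if text.find(marker) != -1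
-- 	]
--
-- 	if not cut_positions:
-- 		return text.strip()
--
-- 	return text[:min(cut_positions)].strip()
-- ===== SOURCE B (Python) =====
-- def _strip_rewrite_metadata_sections(text: str) -> str:
--     """Remove duplicated metadata sections from rewritten_prompt."""
--     if not text:
--         return text
--
--     markers = (
--         "\n**Assumptions**:",
--         "\nAssumptions:",
--         "\n**Open Questions**:",
--         "\nOpen Questions:",
--         "\n**Rationale**:",
--         "\nRationale:",
--     )
--
--     for i in range(len(text)):
--         if any(text.startswith(m, i) for m in markers):
--             return text[:i].strip()
--     return text.strip()
-- ===== Notes on version B (the rewrite author's own statement) =====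
-- stated objective: alternative
-- what changed: Replaces six separate text.find scans plus a min over the collected cut positions with one left-to-right scan that stops at the first position where any marker starts (leftmost-match), slicing there directly.
import Mathlib
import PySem

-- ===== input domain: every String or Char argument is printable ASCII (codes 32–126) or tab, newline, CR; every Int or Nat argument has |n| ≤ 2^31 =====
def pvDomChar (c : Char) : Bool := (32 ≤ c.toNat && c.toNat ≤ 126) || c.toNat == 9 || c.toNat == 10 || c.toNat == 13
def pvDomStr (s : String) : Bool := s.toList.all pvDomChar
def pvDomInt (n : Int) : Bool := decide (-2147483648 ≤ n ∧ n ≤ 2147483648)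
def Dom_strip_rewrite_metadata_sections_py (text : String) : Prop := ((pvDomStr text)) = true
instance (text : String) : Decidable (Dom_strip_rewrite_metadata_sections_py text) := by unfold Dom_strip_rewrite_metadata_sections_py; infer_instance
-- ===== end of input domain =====

-- B replaces A's six separate find scans + min over cut positions by one left-to-right scan
-- that stops at the first position where any marker starts (alternative decomposition, same cost class).


-- ===== PORT A =====
def aMarkers : List String :=
  ["\n**Assumptions**:", "\nAssumptions:", "\n**Open Questions**:",
   "\nOpen Questions:", "\n**Rationale**:", "\nRationale:"]

def strip_rewrite_metadata_sections_py (text : String) : String :=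
  if text = "" then text
  else
    let cut_positions :=
      (aMarkers.filter (fun m => PySem.Str.find text m != -1)).map
        (fun m => PySem.Str.find text m)
    match PySem.List.min? cut_positions (fun x => x) with
    | none => PySem.Str.strip text
    | some p => PySem.Str.strip (PySem.Str.slice text none (some p))

-- ===== PORT B =====
def bMarkers : List String :=
  ["\n**Assumptions**:", "\nAssumptions:", "\n**Open Questions**:",
   "\nOpen Questions:", "\n**Rationale**:", "\nRationale:"]

-- the `for i in range(len(text)) : if any(text.startswith(m, i) ...)` loop of Source B
def bScan (M : List String) : List Char → Option Nat
  | [] => none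
  | c :: rest =>
      if M.any (fun m => m.toList.isPrefixOf (c :: rest)) then some 0
      else (bScan M rest).map (· + 1)

def strip_rewrite_metadata_sections_py_alt (text : String) : String :=
  if text = "" then text
  else
    match bScan bMarkers text.toList with
    | some i => PySem.Str.strip (PySem.Str.slice text none (some (i : Int)))
    | none => PySem.Str.strip text

-- ===== PRECONDITION & SPEC =====
def Spec_strip_rewrite_metadata_sections_py (text : String) (out : String) : Prop := out = strip_rewrite_metadata_sections_py_alt text
instance (text : String) (out : String) : Decidable (Spec_strip_rewrite_metadata_sections_py text out) := by unfold Spec_strip_rewrite_metadata_sections_py; infer_instance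

-- ===== CLAIM (what is proved, stated in full; the proofs are below) =====
def Claim_equal_strip_rewrite_metadata_sections_py : Prop := ∀ (text : String), Dom_strip_rewrite_metadata_sections_py text → Spec_strip_rewrite_metadata_sections_py text (strip_rewrite_metadata_sections_py text)

-- ===== LEMMAS AND PROOFS =====

-- bScan hits: the returned index carries a marker match and is the first such index
theorem bScan_some_spec (M : List String) (cs : List Char) (j : Nat)
    (h : bScan M cs = some j) :
    (∃ m ∈ M, m.toList <+: cs.drop j) ∧
    ∀ i < j, ¬ ∃ m ∈ M, m.toList <+: cs.drop i := by
  induction cs generalizing j with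
  | nil => simp [bScan] at h
  | cons c rest ih =>
      by_cases hc : M.any (fun m => m.toList.isPrefixOf (c :: rest)) = true
      · simp [bScan, hc] at h
        subst h
        refine ⟨?_, by omega⟩
        rcases List.any_eq_true.mp hc with ⟨m, hm, hp⟩
        exact ⟨m, hm, List.isPrefixOf_iff_prefix.mp hp⟩
      · simp [bScan, hc] at h
        rcases h with ⟨j', hj', rfl⟩
        rcases ih j' hj' with ⟨⟨m, hm, hp⟩, hmin⟩
        refine ⟨⟨m, hm, by simpa using hp⟩, ?_⟩
        intro i hi hex
        cases i with
        | zero =>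
            rcases hex with ⟨m, hm, hp⟩
            exact hc (List.any_eq_true.mpr ⟨m, hm, List.isPrefixOf_iff_prefix.mpr (by simpa using hp)⟩)
        | succ i' =>
            exact hmin i' (by omega) (by simpa using hex)

-- bScan misses: no marker matches anywhere (markers are nonempty)
theorem bScan_none_spec (M : List String) (hne : ∀ m ∈ M, m.toList ≠ [])
    (cs : List Char) (h : bScan M cs = none) :
    ∀ i, ¬ ∃ m ∈ M, m.toList <+: cs.drop i := by
  induction cs with
  | nil =>
      intro i ⟨m, hm, hp⟩
      exact hne m hm (List.prefix_nil.mp (by simpa using hp))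
  | cons c rest ih =>
      by_cases hc : M.any (fun m => m.toList.isPrefixOf (c :: rest)) = true
      · simp [bScan, hc] at h
      · simp [bScan, hc] at h
        intro i hex
        cases i with
        | zero =>
            rcases hex with ⟨m, hm, hp⟩
            exact hc (List.any_eq_true.mpr ⟨m, hm, List.isPrefixOf_iff_prefix.mpr (by simpa using hp)⟩)
        | succ i' => exact ih h i' (by simpa using hex)

-- a marker occurs somewhere iff it occurs at some dropped position
theorem find_ne_neg_one_of_prefix (s : String) (m : String) (j : Nat)
    (hp : m.toList <+: s.toList.drop j) : PySem.Str.find s m ≠ -1 := by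
  rw [PySem.Str.find_eq, Ne, PySem.Chars.find_eq_neg_one_iff]
  intro hno
  exact hno ((PySem.Chars.isIn_iff_infix _ _).mp ((PySem.Chars.exists_prefix_drop_iff_isIn _ _).mp ⟨j, hp⟩))

-- ===== VERDICT (by name: the statement is the Claim_ definition above) =====
theorem strip_rewrite_metadata_sections_py_spec : Claim_equal_strip_rewrite_metadata_sections_py := by
  intro text _
  unfold Spec_strip_rewrite_metadata_sections_py
  unfold strip_rewrite_metadata_sections_py strip_rewrite_metadata_sections_py_alt
  by_cases h0 : text = ""
  · simp [h0]
  · simp only [h0, if_false]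
    have hMeq : bMarkers = aMarkers := rfl
    cases hscan : bScan bMarkers text.toList with
    | none =>
        have hall := bScan_none_spec bMarkers (by decide) text.toList hscan
        have hfilt : aMarkers.filter (fun m => PySem.Str.find text m != -1) = [] := by
          rw [List.filter_eq_nil_iff]
          intro m hm
          simp only [bne_iff_ne, ne_eq, not_not]
          rw [PySem.Str.find_eq, PySem.Chars.find_eq_neg_one_iff]
          intro hinf
          have : ∃ j, m.toList <+: text.toList.drop j :=
            (PySem.Chars.exists_prefix_drop_iff_isIn ..).mpr ((PySem.Chars.isIn_iff_infix ..).mpr hinf)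
          rcases this with ⟨j, hj⟩
          exact hall j ⟨m, hMeq ▸ hm, hj⟩
        rw [hfilt]
        rfl
    | some j =>
        rcases bScan_some_spec bMarkers text.toList j hscan with ⟨⟨m0, hm0, hp0⟩, hmin⟩
        rw [hMeq] at hm0
        -- find text m0 = j
        have hfind0 : PySem.Str.find text m0 = (j : Int) := by
          have hne := find_ne_neg_one_of_prefix text m0 j hp0
          have hnn : 0 ≤ PySem.Str.find text m0 := by
            rw [PySem.Str.find_eq] at hne ⊢
            rw [PySem.Chars.find_nonneg_iff]
            by_contra hc
            exact hne ((PySem.Chars.find_eq_neg_one_iff ..).mpr hc)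
          rw [PySem.Str.find_eq] at hnn ⊢
          rcases PySem.Chars.find_spec (s := text.toList) (sub := m0.toList) hnn with ⟨hpf, hmf⟩
          have hle : (PySem.Chars.find text.toList m0.toList).toNat ≤ j := by
            by_contra hgt
            exact hmf j (by omega) hp0
          have hge : j ≤ (PySem.Chars.find text.toList m0.toList).toNat := by
            by_contra hgt
            exact hmin (PySem.Chars.find text.toList m0.toList).toNat (by omega)
              ⟨m0, hMeq ▸ hm0, hpf⟩
          omega
        -- the cut-position list
        set cps := (aMarkers.filter (fun m => PySem.Str.find text m != -1)).map
          (fun m => PySem.Str.find text m) with hcps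
        have hjmem : (j : Int) ∈ cps := by
          rw [hcps]
          refine List.mem_map.mpr ⟨m0, List.mem_filter.mpr ⟨hm0, ?_⟩, hfind0⟩
          have hne0 : PySem.Str.find text m0 ≠ -1 := by rw [hfind0]; omega
          exact bne_iff_ne.mpr hne0
        have hjle : ∀ p ∈ cps, (j : Int) ≤ p := by
          intro p hp
          rcases List.mem_map.mp hp with ⟨m, hmf, rfl⟩
          rcases List.mem_filter.mp hmf with ⟨hm, hmne⟩
          have hnn : 0 ≤ PySem.Str.find text m := by
            rw [PySem.Str.find_eq, PySem.Chars.find_nonneg_iff]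
            by_contra hc
            simp only [bne_iff_ne, ne_eq] at hmne
            exact hmne (by rw [PySem.Str.find_eq]; exact (PySem.Chars.find_eq_neg_one_iff ..).mpr hc)
          rw [PySem.Str.find_eq] at hnn ⊢
          rcases PySem.Chars.find_spec (s := text.toList) (sub := m.toList) hnn with ⟨hpf, _⟩
          have : j ≤ (PySem.Chars.find text.toList m.toList).toNat := by
            by_contra hgt
            exact hmin _ (by omega) ⟨m, hMeq ▸ hm, hpf⟩
          omega
        have hcne : cps ≠ [] := by intro h; rw [h] at hjmem; exact absurd hjmem (List.not_mem_nil)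
        cases hmv : PySem.List.min? cps (fun x => x) with
        | none => exact absurd ((PySem.List.min?_eq_none_iff ..).mp hmv) hcne
        | some v =>
            have hvmem := PySem.List.min?_mem hmv
            have hvmin := PySem.List.min?_isMin hmv
            have hvj : v = (j : Int) := le_antisymm (hvmin _ hjmem) (hjle v hvmem)
            rw [hvj]
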